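-- pv_equiv track=rewrite | github.com/nPerriolat/GladosGenerator | Glados/test.py | group_multiline_string
-- ===== SOURCE A (Python) =====
-- def group_multiline_string(lines : list[str]) -> list[str]:
--     new : list[str] = []
--     is_in_str : bool = False
--
--     for line in lines:
--         if is_in_str:
--             new[-1] += line
--             if "'" in line:
--                 is_in_str = False
--             continue
--         new.append(line)
--         is_in_str = line.count("'") % 2 == 1
--     return new
-- ===== SOURCE B (Python) =====
-- def group_multiline_string(lines : list[str]) -> list[str]:
--     res : list[str] = []
--     i = 0
--     n = len(lines)
--     while i < n:
--         cur = lines[i]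
--         i += 1
--         if cur.count("'") % 2 == 1:
--             # collect the rest of the multiline string: lines without a quote,
--             # then the closing line (if any)
--             while i < n and "'" not in lines[i]:
--                 cur += lines[i]
--                 i += 1
--             if i < n:
--                 cur += lines[i]
--                 i += 1
--         res.append(cur)
--     return res
-- ===== Notes on version B (the rewrite author's own statement) =====
-- stated objective: alternative
-- what changed: Replaces A's single stateful scan with an is_in_str flag and 'new[-1] +=' mutation by a grouping loop: each group opener greedily consumes its continuation lines with an inner loop and is appended once as a finished string.
import Mathlib
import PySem

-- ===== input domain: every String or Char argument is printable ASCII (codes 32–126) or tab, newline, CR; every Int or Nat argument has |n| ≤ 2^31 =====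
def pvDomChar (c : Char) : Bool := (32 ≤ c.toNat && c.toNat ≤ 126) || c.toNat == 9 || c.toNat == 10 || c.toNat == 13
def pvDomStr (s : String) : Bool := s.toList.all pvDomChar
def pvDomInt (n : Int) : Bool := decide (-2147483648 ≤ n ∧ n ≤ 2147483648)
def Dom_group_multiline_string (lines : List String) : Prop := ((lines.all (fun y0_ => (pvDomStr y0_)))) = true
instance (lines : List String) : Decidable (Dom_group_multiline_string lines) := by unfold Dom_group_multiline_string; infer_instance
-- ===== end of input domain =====

-- B is an alternative decomposition of the same O(n) task: a grouping loop instead of A's boolean state machine.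

-- ===== PORT A =====
-- new[-1] += line : append to the last element (the list is nonempty whenever Python reaches it)
def pvAppendLast : List String → String → List String
  | [], _ => []
  | [x], s => [x ++ s]
  | x :: xs, s => x :: pvAppendLast xs s

def pvStepA (st : List String × Bool) (line : String) : List String × Bool :=
  if st.2 then
    (pvAppendLast st.1 line, !(line.toList.contains '\''))
  else
    (st.1 ++ [line], (line.toList.count '\'') % 2 == 1)

def group_multiline_string (lines : List String) : List String :=
  (lines.foldl pvStepA ([], false)).1

-- ===== PORT B =====
-- inner while loop: extend cur with quote-free lines, then the closing line if present
def pvCollect : String → List String → String × List String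
  | cur, [] => (cur, [])
  | cur, l :: rest =>
    if l.toList.contains '\'' then (cur ++ l, rest)
    else pvCollect (cur ++ l) rest

theorem pvCollect_len (cur : String) (ls : List String) :
    (pvCollect cur ls).2.length ≤ ls.length := by
  induction ls generalizing cur with
  | nil => simp [pvCollect]
  | cons l rest ih =>
    simp only [pvCollect]
    split
    · simp
    · exact le_trans (ih _) (Nat.le_succ _)

def group_multiline_string_alt (lines : List String) : List String :=
  match lines with
  | [] => []
  | l :: rest =>
    if (l.toList.count '\'') % 2 == 1 then
      let p := pvCollect l rest
      p.1 :: group_multiline_string_alt p.2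
    else
      l :: group_multiline_string_alt rest
termination_by lines.length
decreasing_by
  · exact Nat.lt_succ_of_le (pvCollect_len _ _)
  · simp

-- ===== PRECONDITION & SPEC =====
def Spec_group_multiline_string (lines : List String) (out : List String) : Prop := out = group_multiline_string_alt lines
instance (lines : List String) (out : List String) : Decidable (Spec_group_multiline_string lines out) := by unfold Spec_group_multiline_string; infer_instance

-- ===== CLAIM (what is proved, stated in full; the proofs are below) =====
def Claim_equal_group_multiline_string : Prop := ∀ (lines : List String), Dom_group_multiline_string lines → Spec_group_multiline_string lines (group_multiline_string lines)

-- ===== LEMMAS AND PROOFS =====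

theorem pvAppendLast_snoc (acc : List String) (cur line : String) :
    pvAppendLast (acc ++ [cur]) line = acc ++ [cur ++ line] := by
  induction acc with
  | nil => simp [pvAppendLast]
  | cons x xs ih =>
    cases xs with
    | nil => simp [pvAppendLast]
    | cons y ys => simpa [pvAppendLast] using ih

-- running A's loop in the in-string state equals collecting into the last element
theorem foldl_true (ls : List String) (acc : List String) (cur : String) :
    (ls.foldl pvStepA (acc ++ [cur], true)).1
      = ((pvCollect cur ls).2.foldl pvStepA (acc ++ [(pvCollect cur ls).1], false)).1 := by
  induction ls generalizing cur with
  | nil => simp [pvCollect]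
  | cons l rest ih =>
    by_cases h : '\'' ∈ l.toList
    · simp [pvStepA, pvCollect, h, pvAppendLast_snoc]
    · simpa [pvStepA, pvCollect, h, pvAppendLast_snoc] using ih (cur ++ l)

theorem foldl_false (n : ℕ) : ∀ (ls : List String), ls.length ≤ n → ∀ (acc : List String),
    (ls.foldl pvStepA (acc, false)).1 = acc ++ group_multiline_string_alt ls := by
  induction n with
  | zero =>
    intro ls h acc
    have : ls = [] := List.eq_nil_of_length_eq_zero (Nat.le_zero.mp h)
    subst this; simp [group_multiline_string_alt]
  | succ n ih =>
    intro ls h acc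
    cases ls with
    | nil => simp [group_multiline_string_alt]
    | cons l rest =>
      simp only [List.foldl_cons, pvStepA, if_neg, Bool.false_eq_true, not_false_iff,
        group_multiline_string_alt]
      by_cases hodd : (l.toList.count '\'') % 2 == 1
      · simp only [hodd, if_pos]
        rw [show (List.foldl pvStepA (acc ++ [l], true) rest).1
              = ((pvCollect l rest).2.foldl pvStepA (acc ++ [(pvCollect l rest).1], false)).1
            from foldl_true rest acc l]
        have hlen : (pvCollect l rest).2.length ≤ n :=
          le_trans (pvCollect_len _ _) (Nat.le_of_succ_le_succ h)
        rw [ih _ hlen]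
        simp
      · simp only [hodd, if_neg, Bool.false_eq_true, not_false_iff]
        rw [ih rest (Nat.le_of_succ_le_succ h)]
        simp

-- ===== VERDICT (by name: the statement is the Claim_ definition above) =====
theorem group_multiline_string_spec : Claim_equal_group_multiline_string := by
  intro lines _
  show group_multiline_string lines = group_multiline_string_alt lines
  have := foldl_false lines.length lines (le_refl _) []
  simpa [group_multiline_string] using this
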